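-- pv_equiv track=rewrite | github.com/34mer/Merged-Repo | scripts/check_surf_finite_fixture_family.py | expected_exponents_from_edges
-- ===== SOURCE A (Python) =====
-- def normalize_edge(edge: list[str]) -> tuple[str, str]:
--     if len(edge) != 2:
--         raise ValueError(f"edge must have two endpoints: {edge}")
--     a, b = str(edge[0]), str(edge[1])
--     return tuple(sorted((a, b)))  # type: ignore[return-value]
--
-- def expected_exponents_from_edges(edges: list[list[str]], curve_ids: set[str]) -> dict[str, dict[str, int]]:
--     exponents: dict[str, dict[str, int]] = {curve_id: {} for curve_id in curve_ids}
--     for raw_edge in edges: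
--         a, b = normalize_edge(raw_edge)
--         if a == b:
--             raise ValueError(f"self-edge not allowed in fixture family: {raw_edge}")
--         exponents.setdefault(a, {})[b] = exponents.setdefault(a, {}).get(b, 0) + 1
--         exponents.setdefault(b, {})[a] = exponents.setdefault(b, {}).get(a, 0) + 1
--     return exponents
-- ===== SOURCE B (Python) =====
-- def expected_exponents_from_edges(edges, curve_ids):
--     # Pass 1: validate each edge and aggregate the multiplicity of its
--     # normalized (sorted) endpoint pair.
--     pair_counts = {}
--     for raw_edge in edges:
--         if len(raw_edge) != 2:
--             raise ValueError(f"edge must have two endpoints: {raw_edge}")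
--         a, b = str(raw_edge[0]), str(raw_edge[1])
--         if a == b:
--             raise ValueError(f"self-edge not allowed in fixture family: {raw_edge}")
--         p = (a, b) if a < b else (b, a)
--         pair_counts[p] = pair_counts.get(p, 0) + 1
--     # Outer key order: the curve ids, then new endpoints in first-pair order.
--     keys = list(curve_ids)
--     for a, b in pair_counts:
--         if a not in keys:
--             keys.append(a)
--         if b not in keys:
--             keys.append(b)
--     # Gather: each curve's row lists its neighbours with the pair multiplicity.
--     return {x: {(b if a == x else a): count
--                 for (a, b), count in pair_counts.items() if x == a or x == b}
--             for x in keys}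
-- ===== Notes on version B (the rewrite author's own statement) =====
-- stated objective: alternative
-- what changed: A updates a nested dict symmetrically twice per edge while iterating; B first validates and aggregates each normalized pair's multiplicity into a flat counter dict, then derives the outer key order and gathers each curve's neighbour row from the aggregated counts.
import Mathlib
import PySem

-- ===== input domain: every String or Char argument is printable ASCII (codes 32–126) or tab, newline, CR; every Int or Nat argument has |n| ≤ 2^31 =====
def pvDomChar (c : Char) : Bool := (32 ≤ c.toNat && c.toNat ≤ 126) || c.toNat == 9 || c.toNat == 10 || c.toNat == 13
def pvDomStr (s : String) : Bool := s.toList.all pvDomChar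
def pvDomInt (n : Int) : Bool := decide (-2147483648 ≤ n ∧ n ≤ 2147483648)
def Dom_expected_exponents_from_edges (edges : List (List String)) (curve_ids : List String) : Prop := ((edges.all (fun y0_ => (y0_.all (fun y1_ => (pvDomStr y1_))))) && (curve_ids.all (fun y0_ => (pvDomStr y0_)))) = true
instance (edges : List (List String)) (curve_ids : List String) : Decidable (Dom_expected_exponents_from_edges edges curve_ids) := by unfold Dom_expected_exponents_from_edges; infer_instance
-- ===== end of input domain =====

-- B re-implements A as aggregate-then-gather: one validation pass builds a multiplicity
-- counter of normalized pairs, then the rows are gathered per key — same return value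
-- (A's incremental symmetric double-update is replaced by a different decomposition).

-- ===== PORT A =====
-- normalize_edge: returns none exactly where the Python raises ValueError (len(edge) != 2)
def pvNormalizeEdge (edge : List String) : Option (String × String) :=
  if edge.length ≠ 2 then none
  else
    let a := PySem.List.pyGetD edge 0 ""   -- tuple unpack of a 2-list: both indices in range
    let b := PySem.List.pyGetD edge 1 ""
    let s := PySem.List.sorted [a, b] id
    some (PySem.List.pyGetD s 0 "", PySem.List.pyGetD s 1 "")

-- one Python statement 'exponents.setdefault(x, {})[y] = exponents.setdefault(x, {}).get(y, 0) + 1'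
-- (RHS evaluated first: its setdefault may create the entry; LHS setdefault then finds it)
def pvStepA (E : PySem.Dict String (PySem.Dict String Int)) (x y : String) :
    PySem.Dict String (PySem.Dict String Int) :=
  let E1 := E.setdefault x PySem.Dict.empty
  let v := (E1.getD x PySem.Dict.empty).getD y 0 + 1
  let E2 := E1.setdefault x PySem.Dict.empty
  E2.insert x ((E2.getD x PySem.Dict.empty).insert y v)

def expected_exponents_from_edges (edges : List (List String)) (curve_ids : List String) :
    List (String × List (String × Int)) :=
  let E0 : PySem.Dict String (PySem.Dict String Int) :=
    curve_ids.foldl (fun d c => d.insert c PySem.Dict.empty) PySem.Dict.empty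
  let r := edges.foldl
    (fun st raw_edge => st.bind (fun E =>
      (pvNormalizeEdge raw_edge).bind (fun p =>
        if p.1 = p.2 then none   -- ValueError: self-edge
        else some (pvStepA (pvStepA E p.1 p.2) p.2 p.1))))
    (some E0)
  match r with
  | some E => E.items.map (fun q => (q.1, q.2.items))
  | none => []   -- the Python raised ValueError here; such inputs are excluded by Pre_

-- ===== PORT B =====
def expected_exponents_from_edges_alt (edges : List (List String)) (curve_ids : List String) :
    List (String × List (String × Int)) :=
  -- pass 1: validate and count normalized pairs (none = the Python raised ValueError)
  let counts := edges.foldl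
    (fun st raw_edge => st.bind (fun d =>
      if raw_edge.length ≠ 2 then none
      else
        let a := PySem.List.pyGetD raw_edge 0 ""
        let b := PySem.List.pyGetD raw_edge 1 ""
        if a = b then none
        else
          let p := if a < b then (a, b) else (b, a)
          some (d.insert p (d.getD p 0 + 1))))
    (some (PySem.Dict.empty : PySem.Dict (String × String) Int))
  match counts with
  | none => []   -- the Python raised ValueError here; such inputs are excluded by Pre_
  | some d =>
    let keys := d.items.foldl
      (fun ks pc =>
        let ks1 := if pc.1.1 ∈ ks then ks else ks ++ [pc.1.1]
        if pc.1.2 ∈ ks1 then ks1 else ks1 ++ [pc.1.2])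
      curve_ids
    keys.map (fun x => (x,
      (d.items.filter (fun pc => x = pc.1.1 ∨ x = pc.1.2)).map
        (fun pc => (if pc.1.1 = x then pc.1.2 else pc.1.1, pc.2))))

-- ===== PRECONDITION & SPEC =====
-- Pre_ excludes exactly the inputs where A raises ValueError (an edge that is not a 2-list,
-- or a self-edge); curve_ids is a Python set, so by the type convention its elements are distinct.
def Pre_expected_exponents_from_edges (edges : List (List String)) (curve_ids : List String) : Prop :=
  curve_ids.Nodup ∧ ∀ e ∈ edges, e.length = 2 ∧ e[0]? ≠ e[1]?
instance (edges : List (List String)) (curve_ids : List String) : Decidable (Pre_expected_exponents_from_edges edges curve_ids) := by unfold Pre_expected_exponents_from_edges; infer_instance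

def pvWitness_expected_exponents_from_edges : List (List String) × List String :=
  ([["a", "b"], ["b", "a"], ["b", "c"]], ["a", "c"])

def Spec_expected_exponents_from_edges (edges : List (List String)) (curve_ids : List String) (out : List (String × List (String × Int))) : Prop := out = expected_exponents_from_edges_alt edges curve_ids
instance (edges : List (List String)) (curve_ids : List String) (out : List (String × List (String × Int))) : Decidable (Spec_expected_exponents_from_edges edges curve_ids out) := by unfold Spec_expected_exponents_from_edges; infer_instance

-- ===== CLAIM (what is proved, stated in full; the proofs are below) =====
def Claim_equal_expected_exponents_from_edges : Prop := ∀ (edges : List (List String)) (curve_ids : List String), Dom_expected_exponents_from_edges edges curve_ids → Pre_expected_exponents_from_edges edges curve_ids → Spec_expected_exponents_from_edges edges curve_ids (expected_exponents_from_edges edges curve_ids)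

-- ===== LEMMAS AND PROOFS =====

-- the normalized pair of a valid 2-element edge
def pvPairOf (e : List String) : String × String :=
  let a := PySem.List.pyGetD e 0 ""
  let b := PySem.List.pyGetD e 1 ""
  if a < b then (a, b) else (b, a)

-- B's outer-key order: curve ids first, then fresh endpoints in pair order (a before b)
def pvAppendNew1 (ks : List String) (x : String) : List String :=
  if x ∈ ks then ks else ks ++ [x]

def pvAppendNew (ks : List String) (p : String × String) : List String :=
  pvAppendNew1 (pvAppendNew1 ks p.1) p.2

def pvKeys (cids : List String) (dl : List (String × String)) : List String :=
  dl.foldl pvAppendNew cids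

-- the row of x determined by the pair list l (B's gather shape)
def pvRow (x : String) (l : List (String × String)) : List (String × Int) :=
  ((PySem.Set.ofList l).filter (fun q => x = q.1 ∨ x = q.2)).map
    (fun q => (if q.1 = x then q.2 else q.1, (l.count q : Int)))

-- bumping key y in an association list (what one pvStepA does to a row)
def pvBump (L : List (String × Int)) (y : String) : List (String × Int) :=
  if y ∈ L.map Prod.fst then L.map (fun q => if q.1 = y then (y, q.2 + 1) else q)
  else L ++ [(y, 1)]

-- ---------- pure list layer ----------
theorem pvMem_appendNew1 (ks : List String) (x z : String) :
    z ∈ pvAppendNew1 ks x ↔ z ∈ ks ∨ z = x := by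
  unfold pvAppendNew1; split_ifs <;> simp_all

theorem pvNodup_appendNew1 (ks : List String) (x : String) (h : ks.Nodup) :
    (pvAppendNew1 ks x).Nodup := by
  unfold pvAppendNew1; split_ifs with hx
  · exact h
  · simp_all [List.nodup_append]
    exact fun a ha e => hx (e ▸ ha)

theorem pvMem_appendNew (ks : List String) (p : String × String) (z : String) :
    z ∈ pvAppendNew ks p ↔ z ∈ ks ∨ z = p.1 ∨ z = p.2 := by
  unfold pvAppendNew; simp [pvMem_appendNew1]; tauto

theorem pvNodup_appendNew (ks : List String) (p : String × String) (h : ks.Nodup) :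
    (pvAppendNew ks p).Nodup :=
  pvNodup_appendNew1 _ _ (pvNodup_appendNew1 _ _ h)

theorem pvKeys_append_singleton (cids : List String) (dl : List (String × String)) (p : String × String) :
    pvKeys cids (dl ++ [p]) = pvAppendNew (pvKeys cids dl) p := by
  simp [pvKeys]

theorem pvMem_keys (cids : List String) (dl : List (String × String)) (z : String) :
    z ∈ pvKeys cids dl ↔ z ∈ cids ∨ ∃ q ∈ dl, z = q.1 ∨ z = q.2 := by
  induction dl generalizing cids with
  | nil => simp [pvKeys]
  | cons q dl ih =>
    show z ∈ pvKeys (pvAppendNew cids q) dl ↔ _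
    rw [ih, pvMem_appendNew]
    simp
    aesop

theorem pvNodup_keys (cids : List String) (dl : List (String × String)) (h : cids.Nodup) :
    (pvKeys cids dl).Nodup := by
  induction dl generalizing cids with
  | nil => exact h
  | cons q dl ih => exact ih _ (pvNodup_appendNew _ _ h)
-- ---------- Dict layer ----------
theorem pvInsert_bump (d : PySem.Dict String Int) (y : String) (hn : d.keys.Nodup) :
    (d.insert y (d.getD y 0 + 1)).items = pvBump d.items y := by
  by_cases hy : d.contains y = true
  · have hmemk : y ∈ d.items.map Prod.fst := by
      have := (PySem.Dict.contains_eq_decide_mem_keys d y).symm.trans hy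
      simpa [PySem.Dict.keys] using of_decide_eq_true this
    rw [PySem.Dict.items_insert_of_contains _ _ hy]
    unfold pvBump
    rw [if_pos hmemk]
    apply List.map_congr_left
    intro r hr
    by_cases hr1 : r.1 = y
    · have : d.getD r.1 0 = r.2 := PySem.Dict.getD_of_mem_items d (by exact hr) hn 0
      simp [hr1] at this ⊢
      omega
    · simp [hr1]
  · have hcf : d.contains y = false := by simpa using hy
    have hnmemk : y ∉ d.items.map Prod.fst := by
      intro hmem
      have : d.contains y = true := by
        rw [PySem.Dict.contains_eq_decide_mem_keys]
        simpa [PySem.Dict.keys] using hmem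
      simp [this] at hcf
    rw [PySem.Dict.items_insert_of_not_contains _ _ hcf,
        PySem.Dict.getD_of_not_contains _ _ hcf]
    unfold pvBump
    rw [if_neg hnmemk]
    norm_num
theorem pvStepA_mapform (K : List String) (R : String → PySem.Dict String Int)
    (x y : String) (E : PySem.Dict String (PySem.Dict String Int))
    (hK : K.Nodup) (hR : x ∈ K → (R x).keys.Nodup)
    (hE : E.items = K.map (fun z => (z, R z))) :
    (pvStepA E x y).items =
      (pvAppendNew1 K x).map
        (fun z => (z, if z = x then
            PySem.Dict.mk (pvBump (if x ∈ K then (R x).items else []) y) else R z)) := by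
  have hkeys : E.keys = K := by
    simp [PySem.Dict.keys, hE, Function.comp_def]
  by_cases hx : x ∈ K
  · have hcont : E.contains x = true := by
      rw [PySem.Dict.contains_eq_decide_mem_keys, hkeys]; simp [hx]
    have hmem : (x, R x) ∈ E.items := by
      rw [hE]; exact List.mem_map_of_mem hx
    have hget : E.getD x PySem.Dict.empty = R x :=
      PySem.Dict.getD_of_mem_items E hmem (hkeys ▸ hK) _
    have hRx : (R x).insert y ((R x).getD y 0 + 1) = PySem.Dict.mk (pvBump (R x).items y) := by
      apply PySem.Dict.ext
      rw [pvInsert_bump _ _ (hR hx)]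
    unfold pvStepA
    simp only [PySem.Dict.setdefault_of_contains _ _ hcont, hget]
    rw [hRx, PySem.Dict.items_insert_of_contains _ _ hcont, hE, List.map_map]
    unfold pvAppendNew1
    rw [if_pos hx, if_pos hx]
    apply List.map_congr_left
    intro z hz
    by_cases hzx : z = x
    · simp [hzx]
    · simp [hzx, Function.comp]
  · have hcont : E.contains x = false := by
      rw [PySem.Dict.contains_eq_decide_mem_keys, hkeys]; simp [hx]
    have hsd : E.setdefault x PySem.Dict.empty = E.insert x PySem.Dict.empty :=
      PySem.Dict.setdefault_of_not_contains _ _ hcont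
    set E1 := E.insert x PySem.Dict.empty with hE1def
    have hE1items : E1.items = E.items ++ [(x, PySem.Dict.empty)] :=
      PySem.Dict.items_insert_of_not_contains _ _ hcont
    have hE1keys : E1.keys = K ++ [x] := by
      simp [PySem.Dict.keys, hE1items, hE, Function.comp_def]
    have hE1nodup : E1.keys.Nodup := by
      rw [hE1keys]; simp [List.nodup_append, hK]
      intro a ha he; exact hx (he ▸ ha)
    have hmem1 : (x, (PySem.Dict.empty : PySem.Dict String Int)) ∈ E1.items := by
      rw [hE1items]; simp
    have hget1 : E1.getD x PySem.Dict.empty = PySem.Dict.empty :=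
      PySem.Dict.getD_of_mem_items E1 hmem1 hE1nodup _
    have hcont1 : E1.contains x = true := by
      rw [PySem.Dict.contains_eq_decide_mem_keys, hE1keys]; simp
    have hempins : (PySem.Dict.empty : PySem.Dict String Int).insert y
        ((PySem.Dict.empty : PySem.Dict String Int).getD y 0 + 1)
        = PySem.Dict.mk (pvBump [] y) := by
      apply PySem.Dict.ext
      rw [pvInsert_bump _ _ PySem.Dict.nodup_keys_empty]
      rfl
    unfold pvStepA
    simp only [hsd]
    rw [hget1]
    simp only [PySem.Dict.setdefault_of_contains _ _ hcont1]
    rw [hget1, hempins, PySem.Dict.items_insert_of_contains _ _ hcont1, hE1items, hE]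
    unfold pvAppendNew1
    rw [if_neg hx, if_neg hx]
    rw [List.map_append, List.map_map]
    simp only [List.map_append]
    congr 1
    · apply List.map_congr_left
      intro z hz
      have hzx : z ≠ x := fun e => hx (e ▸ hz)
      simp [hzx, Function.comp]
    · simp
-- ---------- row layer ----------
theorem pvOther_inj (x : String) (q r : String × String) (hq : q.1 < q.2) (hr : r.1 < r.2)
    (hqx : x = q.1 ∨ x = q.2) (hrx : x = r.1 ∨ x = r.2)
    (h : (if q.1 = x then q.2 else q.1) = (if r.1 = x then r.2 else r.1)) : q = r := by
  have hq' : q = (q.1, q.2) := rfl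
  have hr' : r = (r.1, r.2) := rfl
  by_cases h1 : q.1 = x <;> by_cases h2 : r.1 = x <;> simp [h1, h2] at h
  · rw [hq', hr', h1, h2, h]
  · have hr2 : r.2 = x := (hrx.resolve_left (fun h' => h2 h'.symm)).symm
    have hA : x < q.2 := by rw [← h1]; exact hq
    have hB : q.2 < x := by rw [h, ← hr2]; exact hr
    exact absurd (lt_trans hA hB) (lt_irrefl x)
  · have hq2 : q.2 = x := (hqx.resolve_left (fun h' => h1 h'.symm)).symm
    have hA : x < r.2 := by rw [← h2]; exact hr
    have hB : r.2 < x := by rw [← h, ← hq2]; exact hq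
    exact absurd (lt_trans hA hB) (lt_irrefl x)
  · have hq2 : q.2 = x := (hqx.resolve_left (fun h' => h1 h'.symm)).symm
    have hr2 : r.2 = x := (hrx.resolve_left (fun h' => h2 h'.symm)).symm
    rw [hq', hr', h, hq2, hr2]

theorem pvOfList_append (l : List (String × String)) (p : String × String) :
    PySem.Set.ofList (l ++ [p]) =
      if p ∈ l then PySem.Set.ofList l else PySem.Set.ofList l ++ [p] := by
  have h1 : PySem.Set.ofList (l ++ [p]) = PySem.Set.add (PySem.Set.ofList l) p := by
    simp [PySem.Set.ofList, List.foldl_append]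
  rw [h1, PySem.Set.add]
  by_cases hm : p ∈ l
  · have hc : (PySem.Set.ofList l).contains p = true :=
      List.elem_eq_true_of_mem ((PySem.Set.mem_ofList l p).mpr hm)
    rw [if_pos hc, if_pos hm]
  · have hc : ¬ ((PySem.Set.ofList l).contains p = true) := by
      intro hcc
      exact hm ((PySem.Set.mem_ofList l p).mp (List.mem_of_elem_eq_true hcc))
    rw [if_neg hc, if_neg hm]

theorem pvRow_keys_nodup (x : String) (l : List (String × String))
    (hp : ∀ q ∈ l, q.1 < q.2) : ((pvRow x l).map Prod.fst).Nodup := by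
  unfold pvRow
  rw [List.map_map]
  have hnd : ((PySem.Set.ofList l).filter (fun q => decide (x = q.1 ∨ x = q.2))).Nodup :=
    (PySem.Set.nodup_ofList l).filter _
  apply (List.nodup_map_iff_inj_on hnd).mpr
  intro q hq r hr h
  have hq' := List.mem_filter.mp hq
  have hr' := List.mem_filter.mp hr
  exact pvOther_inj x q r
    (hp q ((PySem.Set.mem_ofList l q).mp hq'.1)) (hp r ((PySem.Set.mem_ofList l r).mp hr'.1))
    (of_decide_eq_true hq'.2) (of_decide_eq_true hr'.2) h

theorem pvRow_nil_of_not_mem (z : String) (l : List (String × String))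
    (h : ∀ q ∈ l, ¬(z = q.1 ∨ z = q.2)) : pvRow z l = [] := by
  unfold pvRow
  rw [List.filter_eq_nil_iff.mpr, List.map_nil]
  intro q hq
  simpa using h q ((PySem.Set.mem_ofList l q).mp hq)

theorem pvRow_irrelevant (z : String) (l : List (String × String)) (p : String × String)
    (hz1 : z ≠ p.1) (hz2 : z ≠ p.2) : pvRow z (l ++ [p]) = pvRow z l := by
  unfold pvRow
  rw [pvOfList_append]
  have hcnt : ∀ q ∈ (PySem.Set.ofList l).filter (fun q => decide (z = q.1 ∨ z = q.2)),
      ((l ++ [p]).count q : Int) = (l.count q : Int) := by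
    intro q hq
    have hended := of_decide_eq_true (List.mem_filter.mp hq).2
    have hqp : p ≠ q := by
      rintro rfl
      rcases hended with h | h
      · exact hz1 h
      · exact hz2 h
    simp [List.count_append, hqp]
  by_cases hm : p ∈ l
  · rw [if_pos hm]
    apply List.map_congr_left
    intro q hq
    rw [hcnt q hq]
  · rw [if_neg hm, List.filter_append]
    have : [p].filter (fun q => decide (z = q.1 ∨ z = q.2)) = [] := by
      simp [hz1, hz2]
    rw [this, List.append_nil]
    apply List.map_congr_left
    intro q hq
    rw [hcnt q hq]
theorem pvRow_key_mem_iff_fst (l : List (String × String)) (p : String × String)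
    (hp : ∀ q ∈ l, q.1 < q.2) (hpp : p.1 < p.2) :
    (p.2 ∈ (pvRow p.1 l).map Prod.fst) ↔ p ∈ l := by
  unfold pvRow
  rw [List.map_map]
  constructor
  · intro h
    obtain ⟨q, hq, hqo⟩ := List.mem_map.mp h
    have hq' := List.mem_filter.mp hq
    have hql : q ∈ l := (PySem.Set.mem_ofList l q).mp hq'.1
    have hqp : q = p :=
      pvOther_inj p.1 q p (hp q hql) hpp (of_decide_eq_true hq'.2) (Or.inl rfl)
        (by simpa using hqo)
    rwa [hqp] at hql
  · intro hpl
    apply List.mem_map.mpr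
    exact ⟨p, List.mem_filter.mpr ⟨(PySem.Set.mem_ofList l p).mpr hpl, by simp⟩, by simp⟩

theorem pvRow_key_mem_iff_snd (l : List (String × String)) (p : String × String)
    (hp : ∀ q ∈ l, q.1 < q.2) (hpp : p.1 < p.2) :
    (p.1 ∈ (pvRow p.2 l).map Prod.fst) ↔ p ∈ l := by
  have hne : p.1 ≠ p.2 := ne_of_lt hpp
  unfold pvRow
  rw [List.map_map]
  constructor
  · intro h
    obtain ⟨q, hq, hqo⟩ := List.mem_map.mp h
    have hq' := List.mem_filter.mp hq
    have hql : q ∈ l := (PySem.Set.mem_ofList l q).mp hq'.1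
    have hqp : q = p :=
      pvOther_inj p.2 q p (hp q hql) hpp (of_decide_eq_true hq'.2) (Or.inr rfl)
        (by simpa [hne] using hqo)
    rwa [hqp] at hql
  · intro hpl
    apply List.mem_map.mpr
    exact ⟨p, List.mem_filter.mpr ⟨(PySem.Set.mem_ofList l p).mpr hpl, by simp⟩, by simp [hne]⟩

theorem pvRow_bump_fst (l : List (String × String)) (p : String × String)
    (hp : ∀ q ∈ l, q.1 < q.2) (hpp : p.1 < p.2) :
    pvRow p.1 (l ++ [p]) = pvBump (pvRow p.1 l) p.2 := by
  by_cases hpl : p ∈ l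
  · have hkey : p.2 ∈ (pvRow p.1 l).map Prod.fst :=
      (pvRow_key_mem_iff_fst l p hp hpp).mpr hpl
    unfold pvBump
    rw [if_pos hkey]
    unfold pvRow
    rw [pvOfList_append, if_pos hpl, List.map_map]
    apply List.map_congr_left
    intro q hq
    have hq' := List.mem_filter.mp hq
    have hql : q ∈ l := (PySem.Set.mem_ofList l q).mp hq'.1
    by_cases hqp : q = p
    · subst hqp
      simp [List.count_append]
    · have hoth : (if q.1 = p.1 then q.2 else q.1) ≠ p.2 := by
        intro he
        exact hqp (pvOther_inj p.1 q p (hp q hql) hpp (of_decide_eq_true hq'.2) (Or.inl rfl)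
          (by simpa using he))
      have hpq : p ≠ q := fun e => hqp e.symm
      simp [Function.comp, hoth, List.count_append, hpq]
  · have hkey : p.2 ∉ (pvRow p.1 l).map Prod.fst := fun h =>
      hpl ((pvRow_key_mem_iff_fst l p hp hpp).mp h)
    unfold pvBump
    rw [if_neg hkey]
    unfold pvRow
    rw [pvOfList_append, if_neg hpl, List.filter_append]
    have hfp : ([p].filter (fun q => decide (p.1 = q.1 ∨ p.1 = q.2))) = [p] := by simp
    rw [hfp, List.map_append]
    congr 1
    · apply List.map_congr_left
      intro q hq
      have hq' := List.mem_filter.mp hq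
      have hql : q ∈ l := (PySem.Set.mem_ofList l q).mp hq'.1
      have hpq : p ≠ q := fun e => hpl (e ▸ hql)
      simp [List.count_append, hpq]
    · have hcnt : l.count p = 0 := List.count_eq_zero.mpr hpl
      simp [List.count_append, hcnt]

theorem pvRow_bump_snd (l : List (String × String)) (p : String × String)
    (hp : ∀ q ∈ l, q.1 < q.2) (hpp : p.1 < p.2) :
    pvRow p.2 (l ++ [p]) = pvBump (pvRow p.2 l) p.1 := by
  have hne : p.1 ≠ p.2 := ne_of_lt hpp
  by_cases hpl : p ∈ l
  · have hkey : p.1 ∈ (pvRow p.2 l).map Prod.fst :=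
      (pvRow_key_mem_iff_snd l p hp hpp).mpr hpl
    unfold pvBump
    rw [if_pos hkey]
    unfold pvRow
    rw [pvOfList_append, if_pos hpl, List.map_map]
    apply List.map_congr_left
    intro q hq
    have hq' := List.mem_filter.mp hq
    have hql : q ∈ l := (PySem.Set.mem_ofList l q).mp hq'.1
    by_cases hqp : q = p
    · subst hqp
      simp [List.count_append, hne]
    · have hoth : (if q.1 = p.2 then q.2 else q.1) ≠ p.1 := by
        intro he
        exact hqp (pvOther_inj p.2 q p (hp q hql) hpp (of_decide_eq_true hq'.2) (Or.inr rfl)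
          (by simpa [hne] using he))
      have hpq : p ≠ q := fun e => hqp e.symm
      simp [Function.comp, hoth, List.count_append, hpq]
  · have hkey : p.1 ∉ (pvRow p.2 l).map Prod.fst := fun h =>
      hpl ((pvRow_key_mem_iff_snd l p hp hpp).mp h)
    unfold pvBump
    rw [if_neg hkey]
    unfold pvRow
    rw [pvOfList_append, if_neg hpl, List.filter_append]
    have hfp : ([p].filter (fun q => decide (p.2 = q.1 ∨ p.2 = q.2))) = [p] := by simp
    rw [hfp, List.map_append]
    congr 1
    · apply List.map_congr_left
      intro q hq
      have hq' := List.mem_filter.mp hq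
      have hql : q ∈ l := (PySem.Set.mem_ofList l q).mp hq'.1
      have hpq : p ≠ q := fun e => hpl (e ▸ hql)
      simp [List.count_append, hpq]
    · have hcnt : l.count p = 0 := List.count_eq_zero.mpr hpl
      simp [List.count_append, hcnt, hne]
theorem pvSeed_items (cids : List String) (hc : cids.Nodup) :
    (cids.foldl (fun d c => d.insert c PySem.Dict.empty) PySem.Dict.empty).items
      = cids.map (fun z => (z, (PySem.Dict.mk (pvRow z []) : PySem.Dict String Int))) := by
  have h := PySem.Dict.items_foldl_insert_fresh (l := cids) (k := fun c => c)
      (v := fun _ => (PySem.Dict.empty : PySem.Dict String Int))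
      (d := PySem.Dict.empty)
      (by intro a _; exact PySem.Dict.contains_empty a) (by simpa using hc)
  simpa [pvRow] using h

theorem pvMain (cids : List String) (hc : cids.Nodup)
    (l : List (String × String)) (hp : ∀ p ∈ l, p.1 < p.2) :
    (l.foldl (fun E p => pvStepA (pvStepA E p.1 p.2) p.2 p.1)
        (cids.foldl (fun d c => d.insert c PySem.Dict.empty) PySem.Dict.empty)).items
      = (pvKeys cids (PySem.Set.ofList l)).map
          (fun z => (z, PySem.Dict.mk (pvRow z l))) := by
  induction l using List.reverseRecOn with
  | nil => simpa [pvKeys] using pvSeed_items cids hc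
  | append_singleton l p ih =>
    have hp' : ∀ q ∈ l, q.1 < q.2 := fun q hq => hp q (List.mem_append_left _ hq)
    have hpp : p.1 < p.2 := hp p (by simp)
    have hne : p.1 ≠ p.2 := ne_of_lt hpp
    rw [List.foldl_append, List.foldl_cons, List.foldl_nil]
    set K := pvKeys cids (PySem.Set.ofList l) with hKdef
    have hK : K.Nodup := pvNodup_keys _ _ hc
    have hrow_nil : ∀ z : String, z ∉ K → pvRow z l = [] := by
      intro z hz
      apply pvRow_nil_of_not_mem
      intro q hq hor
      exact hz ((pvMem_keys _ _ _).mpr (Or.inr ⟨q, (PySem.Set.mem_ofList l q).mpr hq, hor⟩))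
    have h1 := pvStepA_mapform K (fun z => PySem.Dict.mk (pvRow z l)) p.1 p.2 _ hK
        (fun _ => by
          have := pvRow_keys_nodup p.1 l hp'
          simpa [PySem.Dict.keys] using this)
        (ih hp')
    have hbr1 : (if p.1 ∈ K then (PySem.Dict.mk (pvRow p.1 l)).items else []) = pvRow p.1 l := by
      by_cases hx : p.1 ∈ K
      · simp [hx]
      · simp [hx, hrow_nil _ hx]
    rw [hbr1] at h1
    have h2 := pvStepA_mapform (pvAppendNew1 K p.1)
        (fun z => if z = p.1 then PySem.Dict.mk (pvBump (pvRow p.1 l) p.2)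
                  else PySem.Dict.mk (pvRow z l))
        p.2 p.1 _ (pvNodup_appendNew1 _ _ hK)
        (fun _ => by
          simpa [hne.symm, PySem.Dict.keys] using pvRow_keys_nodup p.2 l hp')
        (by rw [h1])
    have hbr2 : (if p.2 ∈ pvAppendNew1 K p.1 then
        (if p.2 = p.1 then PySem.Dict.mk (pvBump (pvRow p.1 l) p.2)
         else PySem.Dict.mk (pvRow p.2 l)).items else []) = pvRow p.2 l := by
      by_cases hx : p.2 ∈ pvAppendNew1 K p.1
      · simp [hx, hne.symm]
      · have hxK : p.2 ∉ K := fun h => hx ((pvMem_appendNew1 _ _ _).mpr (Or.inl h))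
        simp [hx, hrow_nil _ hxK]
    rw [hbr2] at h2
    rw [h2]
    have hkeys_eq : pvKeys cids (PySem.Set.ofList (l ++ [p]))
        = pvAppendNew1 (pvAppendNew1 K p.1) p.2 := by
      rw [pvOfList_append]
      by_cases hpl : p ∈ l
      · rw [if_pos hpl]
        have ha : p.1 ∈ K := (pvMem_keys _ _ _).mpr
          (Or.inr ⟨p, (PySem.Set.mem_ofList l p).mpr hpl, Or.inl rfl⟩)
        have hb : p.2 ∈ K := (pvMem_keys _ _ _).mpr
          (Or.inr ⟨p, (PySem.Set.mem_ofList l p).mpr hpl, Or.inr rfl⟩)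
        rw [← hKdef]
        unfold pvAppendNew1
        rw [if_pos ha, if_pos hb]
      · rw [if_neg hpl, pvKeys_append_singleton, ← hKdef]
        rfl
    rw [hkeys_eq]
    apply List.map_congr_left
    intro z _
    dsimp only
    by_cases hz2 : z = p.2
    · subst hz2
      rw [if_pos rfl, pvRow_bump_snd l p hp' hpp]
    · rw [if_neg hz2]
      by_cases hz1 : z = p.1
      · subst hz1
        rw [if_pos rfl, pvRow_bump_fst l p hp' hpp]
      · rw [if_neg hz1, pvRow_irrelevant z l p hz1 hz2]
-- ---------- tying the ports to pvPairOf / pvRow / pvKeys ----------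
theorem pvSorted_pair_lt (a b : String) (h : a < b) : PySem.List.sorted [a, b] id = [a, b] := by
  rw [String.lt_iff_toList_lt] at h
  simp [PySem.List.sorted, PySem.List.insertBy]
  intro h2
  exact absurd h (asymm h2)

theorem pvSorted_pair_gt (a b : String) (h : b < a) : PySem.List.sorted [a, b] id = [b, a] := by
  rw [String.lt_iff_toList_lt] at h
  simp [PySem.List.sorted, PySem.List.insertBy]
  intro h2
  exact absurd (lt_of_le_of_lt h2 h) (lt_irrefl _)

theorem pvNormalize_valid (e : List String) (h2 : e.length = 2) (hne : e[0]? ≠ e[1]?) :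
    pvNormalizeEdge e = some (pvPairOf e) ∧ (pvPairOf e).1 < (pvPairOf e).2 := by
  match e with
  | [a, b] =>
    have hab : a ≠ b := by simpa using hne
    have ha : PySem.List.pyGetD [a, b] 0 "" = a := rfl
    have hb : PySem.List.pyGetD [a, b] 1 "" = b := rfl
    unfold pvNormalizeEdge pvPairOf
    simp only [ha, hb, List.length_cons, List.length_nil]
    rw [if_neg (by omega)]
    rcases lt_trichotomy a b with h | h | h
    · rw [if_pos h, pvSorted_pair_lt a b h]
      exact ⟨rfl, h⟩
    · exact absurd h hab
    · rw [if_neg (asymm h), pvSorted_pair_gt a b h]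
      exact ⟨rfl, h⟩

theorem pvALoop (edges : List (List String))
    (hE : ∀ e ∈ edges, e.length = 2 ∧ e[0]? ≠ e[1]?)
    (E0 : PySem.Dict String (PySem.Dict String Int)) :
    edges.foldl
      (fun st raw_edge => st.bind (fun E =>
        (pvNormalizeEdge raw_edge).bind (fun p =>
          if p.1 = p.2 then none
          else some (pvStepA (pvStepA E p.1 p.2) p.2 p.1))))
      (some E0)
    = some ((edges.map pvPairOf).foldl
        (fun E p => pvStepA (pvStepA E p.1 p.2) p.2 p.1) E0) := by
  induction edges generalizing E0 with
  | nil => rfl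
  | cons e rest ih =>
    obtain ⟨hnv, hlt⟩ := pvNormalize_valid e (hE e (by simp)).1 (hE e (by simp)).2
    rw [List.foldl_cons, List.map_cons, List.foldl_cons]
    have hbody : (some E0).bind (fun E =>
        (pvNormalizeEdge e).bind (fun p =>
          if p.1 = p.2 then none
          else some (pvStepA (pvStepA E p.1 p.2) p.2 p.1)))
        = some (pvStepA (pvStepA E0 (pvPairOf e).1 (pvPairOf e).2) (pvPairOf e).2 (pvPairOf e).1) := by
      rw [Option.bind_some, hnv, Option.bind_some, if_neg (ne_of_lt hlt)]
    rw [hbody]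
    exact ih (fun e' he' => hE e' (List.mem_cons_of_mem _ he')) _

theorem pvBbody (e : List String) (h2 : e.length = 2) (hne : e[0]? ≠ e[1]?)
    (d : PySem.Dict (String × String) Int) :
    (if e.length ≠ 2 then none
     else
       let a := PySem.List.pyGetD e 0 ""
       let b := PySem.List.pyGetD e 1 ""
       if a = b then none
       else
         let p := if a < b then (a, b) else (b, a)
         some (d.insert p (d.getD p 0 + 1)))
    = some (d.insert (pvPairOf e) (d.getD (pvPairOf e) 0 + 1)) := by
  match e with
  | [a, b] =>
    have hab : a ≠ b := by simpa using hne
    have ha : PySem.List.pyGetD [a, b] 0 "" = a := rfl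
    have hb : PySem.List.pyGetD [a, b] 1 "" = b := rfl
    unfold pvPairOf
    simp only [ha, hb, List.length_cons, List.length_nil]
    rw [if_neg (by omega), if_neg hab]

theorem pvBLoop (edges : List (List String))
    (hE : ∀ e ∈ edges, e.length = 2 ∧ e[0]? ≠ e[1]?)
    (d0 : PySem.Dict (String × String) Int) :
    edges.foldl
      (fun st raw_edge => st.bind (fun d =>
        if raw_edge.length ≠ 2 then none
        else
          let a := PySem.List.pyGetD raw_edge 0 ""
          let b := PySem.List.pyGetD raw_edge 1 ""
          if a = b then none
          else
            let p := if a < b then (a, b) else (b, a)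
            some (d.insert p (d.getD p 0 + 1))))
      (some d0)
    = some ((edges.map pvPairOf).foldl
        (fun d p => d.insert p (d.getD p 0 + 1)) d0) := by
  induction edges generalizing d0 with
  | nil => rfl
  | cons e rest ih =>
    rw [List.foldl_cons, List.map_cons, List.foldl_cons]
    rw [Option.bind_some, pvBbody e (hE e (by simp)).1 (hE e (by simp)).2 d0]
    exact ih (fun e' he' => hE e' (List.mem_cons_of_mem _ he')) _

-- ===== VERDICT (by name: the statement is the Claim_ definition above) =====
theorem expected_exponents_from_edges_spec : Claim_equal_expected_exponents_from_edges := by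
  intro edges curve_ids _hdom hpre
  obtain ⟨hc, hE⟩ := hpre
  unfold Spec_expected_exponents_from_edges
  have hp : ∀ p ∈ edges.map pvPairOf, p.1 < p.2 := by
    intro p hpmem
    obtain ⟨e, he, rfl⟩ := List.mem_map.mp hpmem
    exact (pvNormalize_valid e (hE e he).1 (hE e he).2).2
  -- A side
  have hA : expected_exponents_from_edges edges curve_ids
      = (pvKeys curve_ids (PySem.Set.ofList (edges.map pvPairOf))).map
          (fun z => (z, pvRow z (edges.map pvPairOf))) := by
    unfold expected_exponents_from_edges
    dsimp only
    rw [pvALoop edges hE _]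
    show (List.map (fun q => (q.1, q.2.items))
        (List.foldl (fun E p => pvStepA (pvStepA E p.1 p.2) p.2 p.1)
          (List.foldl (fun d c => d.insert c PySem.Dict.empty) PySem.Dict.empty curve_ids)
          (List.map pvPairOf edges)).items) = _
    rw [pvMain curve_ids hc (edges.map pvPairOf) hp]
    rw [List.map_map]
    rfl
  -- B side
  have hB : expected_exponents_from_edges_alt edges curve_ids
      = (pvKeys curve_ids (PySem.Set.ofList (edges.map pvPairOf))).map
          (fun z => (z, pvRow z (edges.map pvPairOf))) := by
    unfold expected_exponents_from_edges_alt
    dsimp only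
    rw [pvBLoop edges hE _, PySem.Dict.foldl_insert_getD_add_one_eq_counter]
    show (let d := PySem.Dict.counter (List.map pvPairOf edges)
      let keys := d.items.foldl
        (fun ks pc =>
          let ks1 := if pc.1.1 ∈ ks then ks else ks ++ [pc.1.1]
          if pc.1.2 ∈ ks1 then ks1 else ks1 ++ [pc.1.2])
        curve_ids
      keys.map (fun x => (x,
        (d.items.filter (fun pc => x = pc.1.1 ∨ x = pc.1.2)).map
          (fun pc => (if pc.1.1 = x then pc.1.2 else pc.1.1, pc.2))))) = _
    dsimp only
    rw [PySem.Dict.items_counter]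
    congr 1
    case e_l => rw [List.foldl_map]; rfl
    case e_f =>
      funext x
      rw [List.filter_map, List.map_map]
      rfl
  rw [hA, hB]
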